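-- pv_equiv track=rewrite | github.com/SAutum/ai-ds | rdb/hongli/assignment-11/exercise_2_a.py | one_dim_to_n_dim
-- ===== SOURCE A (Python) =====
-- def one_dim_to_n_dim(index: int, grid_size: int, dimension: int) -> tuple[int, ...]:
--     """
--     Convert a one-dimensional index to an n-dimensional point on a z-curve.
--
--     Parameters
--     ----------
--     index : int
--         A one-dimensional index.
--     grid_size : int
--         Width and height of the grid. Must be a power of two and at least 2.
--     dimension : int
--         Dimension of the resulting point.
--
--     Returns
--     -------
--
--     point : tuple of ints, len(tuple) = dimension
--         The point on the Z-curve corresponding to the index.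
--
--     Examples
--     --------
--
--         (0, 0) == one_dim_to_n_dim(0, 2, 2)
--         (1, 0) == one_dim_to_n_dim(1, 2, 2)
--         (0, 1) == one_dim_to_n_dim(2, 2, 2)
--         (1, 1) == one_dim_to_n_dim(3, 2, 2)
--
--         (1, 0, 0) == one_dim_to_n_dim(1, 2, 3)
--         (0, 1, 0) == one_dim_to_n_dim(2, 2, 3)
--         (0, 0, 1) == one_dim_to_n_dim(4, 2, 3)
--
--     """
--
--     # check if index is within bounds
--     if index < 0 or index >= grid_size ** dimension:
--         raise ValueError("Index out of bounds.")
--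
--     # convert index to n-dimensional indices
--     n_dim_indices = []
--     for d in range(dimension):
--         _bindex = index >> d
--         n_dim_index = ''
--         # using string and binary operations to get the n-dimensional index
--         for i in range(grid_size):
--             n_dim_index = bin(_bindex)[-1] + n_dim_index
--             _bindex = _bindex >> dimension
--         n_dim_indices.append(int(n_dim_index, 2))
--
--     return tuple(n_dim_indices)
-- ===== SOURCE B (Python) =====
-- def one_dim_to_n_dim(index: int, grid_size: int, dimension: int) -> tuple[int, ...]:
--     # Same result as A, but per coordinate we walk only the set bits of the
--     # shifted index with integer bit ops (stop when zero) instead of building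
--     # a grid_size-character binary string and re-parsing it.
--     if index < 0 or index >= grid_size ** dimension:
--         raise ValueError("Index out of bounds.")
--     point = []
--     for d in range(dimension):
--         x = index >> d
--         v = 0
--         i = 0
--         while x:
--             v |= (x & 1) << i
--             x >>= dimension
--             i += 1
--         point.append(v)
--     return tuple(point)
-- ===== Notes on version B (the rewrite author's own statement) =====
-- stated objective: faster
-- what changed: Per coordinate, A builds a grid_size-character binary string (one char per inner-loop iteration via bin()) and re-parses it with int(s, 2); B gathers the same bits with integer bit operations (&, |, shifts) and stops as soon as the shifted index is zero, so it does ~log2(index)/dimension bit steps instead of grid_size string steps per dimension.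
-- outside the precondition, e.g. on one_dim_to_n_dim(0, 2, -1): A returns (), B returns ()
import Mathlib
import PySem

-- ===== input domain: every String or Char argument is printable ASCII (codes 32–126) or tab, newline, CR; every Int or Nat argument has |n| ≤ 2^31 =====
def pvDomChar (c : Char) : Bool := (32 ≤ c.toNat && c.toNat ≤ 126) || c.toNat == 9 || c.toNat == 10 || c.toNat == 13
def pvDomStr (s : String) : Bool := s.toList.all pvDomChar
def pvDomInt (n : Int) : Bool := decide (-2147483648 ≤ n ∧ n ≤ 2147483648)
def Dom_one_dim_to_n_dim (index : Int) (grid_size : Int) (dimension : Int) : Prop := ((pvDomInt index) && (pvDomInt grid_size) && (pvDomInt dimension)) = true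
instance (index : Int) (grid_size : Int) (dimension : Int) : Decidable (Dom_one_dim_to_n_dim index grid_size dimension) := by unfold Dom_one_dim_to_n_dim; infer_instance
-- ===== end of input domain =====

-- ===== PORT A =====
-- B replaces A's per-coordinate binary-string building/re-parsing by bit operations that stop at the
-- highest set bit (objective: faster).

-- bin(x)[-1]: the last binary digit of x; Python's x % 2 (floor mod) gives it for every int.
def pvBinLast (x : Int) : Char := if PySem.Int.mod x 2 = 0 then '0' else '1'

-- int(s, 2) on the nonempty '0'/'1' strings A builds; int('', 2) raises ValueError (excluded by Pre_).
def pvIntOfBin (s : List Char) : Int := s.foldl (fun a c => 2 * a + (if c = '1' then 1 else 0)) 0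

-- A: for each d, build the coordinate as a binary string, one char per inner-loop step, then parse it.
-- Python's '>>' is Lean's '>>>' with a Nat shift ('d.toNat'/'dimension.toNat' exact: d, dimension ≥ 0
-- under Pre_); the ValueError branch (index out of bounds) returns [] here and is outside Pre_.
def one_dim_to_n_dim (index : Int) (grid_size : Int) (dimension : Int) : List Int :=
  if index < 0 ∨ grid_size ^ dimension.toNat ≤ index then []
  else
    List.foldl (fun ns d =>
        ns ++ [pvIntOfBin (List.foldl
          (fun (st : Int × List Char) (_ : Int) => (st.1 >>> dimension.toNat, pvBinLast st.1 :: st.2))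
          (index >>> d.toNat, ([] : List Char)) (PySem.List.pyRange 0 grid_size)).2])
      [] (PySem.List.pyRange 0 dimension)

-- ===== PORT B =====
-- B's 'while x:' loop; the fuel (x.toNat + 1 at the call) only makes the recursion total: for the
-- x ≥ 0 reached under Pre_ the loop hits x = 0 before the fuel runs out (Python diverges on x < 0).
def pvDeintLoop (dimension : Int) : Nat → Int → Int → Nat → Int
  | 0, _, v, _ => v
  | fuel+1, x, v, i =>
    if x = 0 then v
    else pvDeintLoop dimension fuel (x >>> dimension.toNat)
           (PySem.Int.bor v ((PySem.Int.band x 1) <<< i)) (i + 1)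

def one_dim_to_n_dim_alt (index : Int) (grid_size : Int) (dimension : Int) : List Int :=
  if index < 0 ∨ grid_size ^ dimension.toNat ≤ index then []
  else
    List.foldl (fun pt d =>
        pt ++ [pvDeintLoop dimension ((index >>> d.toNat).toNat + 1) (index >>> d.toNat) 0 0])
      [] (PySem.List.pyRange 0 dimension)

-- ===== PRECONDITION & SPEC =====
-- Pre_ excludes (a) out-of-bounds indices, where A raises ValueError; (b) grid_size ≤ 0 with
-- dimension ≥ 1, where A always raises (int('', 2) or the bounds check); and (c) dimension < 0,
-- outside the documented domain, where A's bounds check compares against a float power (not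
-- portable under the int convention); there A either raises or returns (), and B does the same.
def Pre_one_dim_to_n_dim (index : Int) (grid_size : Int) (dimension : Int) : Prop :=
  0 ≤ dimension ∧ (dimension = 0 ∨ 1 ≤ grid_size) ∧ 0 ≤ index ∧ index < grid_size ^ dimension.toNat
instance (index : Int) (grid_size : Int) (dimension : Int) : Decidable (Pre_one_dim_to_n_dim index grid_size dimension) := by unfold Pre_one_dim_to_n_dim; infer_instance

def pvWitness_one_dim_to_n_dim : Int × Int × Int := (7, 4, 2)

def Spec_one_dim_to_n_dim (index : Int) (grid_size : Int) (dimension : Int) (out : List Int) : Prop := out = one_dim_to_n_dim_alt index grid_size dimension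
instance (index : Int) (grid_size : Int) (dimension : Int) (out : List Int) : Decidable (Spec_one_dim_to_n_dim index grid_size dimension out) := by unfold Spec_one_dim_to_n_dim; infer_instance

-- ===== CLAIM (what is proved, stated in full; the proofs are below) =====
def Claim_equal_one_dim_to_n_dim : Prop := ∀ (index : Int) (grid_size : Int) (dimension : Int), Dom_one_dim_to_n_dim index grid_size dimension → Pre_one_dim_to_n_dim index grid_size dimension → Spec_one_dim_to_n_dim index grid_size dimension (one_dim_to_n_dim index grid_size dimension)

-- ===== LEMMAS AND PROOFS =====

-- The common spec: pvT m k n gathers the k bits of n at positions 0, m, 2m, …, (k-1)m.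
def pvT (m : Nat) : Nat → Nat → Nat
  | 0, _ => 0
  | k+1, n => 2 * pvT m k (n >>> m) + n % 2

-- The string A's inner loop has built after k steps starting from x (most significant char first).
def pvRevBits (m : Nat) : Nat → Int → List Char
  | 0, _ => []
  | k+1, x => pvRevBits m k (x >>> m) ++ [pvBinLast x]

theorem pvShiftRCast (n k : Nat) : (n : Int) >>> k = ((n >>> k : Nat) : Int) := by
  rw [← Int.shiftRight_natCast_right, Int.shiftRight_natCast]

theorem pvShiftLCast (n k : Nat) : (n : Int) <<< k = ((n <<< k : Nat) : Int) := by
  rw [← Int.shiftLeft_natCast_right, Int.shiftLeft_natCast]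

theorem pvT_zero (m : Nat) : ∀ k, pvT m k 0 = 0 := by
  intro k; induction k with
  | zero => rfl
  | succ k ih => simp [pvT, Nat.zero_shiftRight, ih]

theorem pvShiftBound {m k n : Nat} (hn : n < 2 ^ (m * (k + 1))) : n >>> m < 2 ^ (m * k) := by
  rw [Nat.shiftRight_eq_div_pow]
  rw [Nat.div_lt_iff_lt_mul (Nat.two_pow_pos m)]
  calc n < 2 ^ (m * (k + 1)) := hn
    _ = 2 ^ (m * k) * 2 ^ m := by rw [← pow_add]; ring_nf

theorem pvT_ext (m : Nat) : ∀ k (j n : Nat), n < 2 ^ (m * k) → pvT m (k + j) n = pvT m k n := by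
  intro k
  induction k with
  | zero =>
    intro j n hn
    simp only [Nat.mul_zero, pow_zero, Nat.lt_one_iff] at hn
    subst hn
    rw [pvT_zero, pvT_zero]
  | succ k ih =>
    intro j n hn
    have hk : k + 1 + j = (k + j) + 1 := by omega
    rw [hk]
    show 2 * pvT m (k + j) (n >>> m) + n % 2 = 2 * pvT m k (n >>> m) + n % 2
    rw [ih j (n >>> m) (pvShiftBound hn)]

theorem pvInner (m : Nat) : ∀ (l : List Int) (x : Int) (s : List Char),
    (List.foldl (fun (st : Int × List Char) (_ : Int) => (st.1 >>> m, pvBinLast st.1 :: st.2))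
      (x, s) l).2 = pvRevBits m l.length x ++ s := by
  intro l
  induction l with
  | nil => intro x s; simp [pvRevBits]
  | cons a t ih =>
    intro x s
    simp only [List.foldl_cons, List.length_cons]
    rw [ih]
    show pvRevBits m t.length (x >>> m) ++ (pvBinLast x :: s)
      = pvRevBits m (t.length + 1) x ++ s
    simp [pvRevBits, List.append_assoc]

theorem pvParse_revBits (m : Nat) : ∀ (k n : Nat),
    pvIntOfBin (pvRevBits m k (n : Int)) = (pvT m k n : Int) := by
  intro k
  induction k with
  | zero => intro n; simp [pvRevBits, pvIntOfBin, pvT]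
  | succ k ih =>
    intro n
    show pvIntOfBin (pvRevBits m k ((n : Int) >>> m) ++ [pvBinLast (n : Int)]) = _
    rw [pvShiftRCast]
    unfold pvIntOfBin
    rw [List.foldl_append]
    have hih := ih (n >>> m)
    unfold pvIntOfBin at hih
    rw [hih]
    show 2 * ((pvT m k (n >>> m) : Nat) : Int) + (if pvBinLast (n : Int) = '1' then 1 else 0)
      = ((pvT m (k + 1) n : Nat) : Int)
    have hmod : PySem.Int.mod (n : Int) 2 = ((n % 2 : Nat) : Int) := by
      exact_mod_cast PySem.Int.mod_natCast n 2
    unfold pvBinLast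
    rw [hmod]
    rcases Nat.mod_two_eq_zero_or_one n with h | h <;> simp [h, pvT]

theorem pvLorPow : ∀ (i v : Nat), v < 2 ^ i → v ||| 2 ^ i = v + 2 ^ i := by
  intro i
  induction i with
  | zero =>
    intro v hv
    simp only [pow_zero, Nat.lt_one_iff] at hv
    subst hv; decide
  | succ i ih =>
    intro v hv
    have hq : v / 2 < 2 ^ i := by
      rw [Nat.div_lt_iff_lt_mul (by norm_num)]
      calc v < 2 ^ (i + 1) := hv
        _ = 2 ^ i * 2 := by ring
    have hb : v = Nat.bit (decide (v % 2 = 1)) (v / 2) := by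
      rcases Nat.mod_two_eq_zero_or_one v with h | h <;> simp [Nat.bit, h] <;> omega
    have h2 : (2 : Nat) ^ (i + 1) = Nat.bit false (2 ^ i) := by simp [Nat.bit]; ring
    rw [hb, h2, Nat.lor_bit, ih _ hq]
    rcases Nat.mod_two_eq_zero_or_one v with h | h <;> simp [Nat.bit, h] <;> omega

theorem pvB (dim : Int) : ∀ (k fuel n v i : Nat),
    v < 2 ^ i → n < 2 ^ (dim.toNat * k) → k ≤ fuel →
    pvDeintLoop dim fuel (n : Int) (v : Int) i = ((v + 2 ^ i * pvT dim.toNat k n : Nat) : Int) := by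
  intro k
  induction k with
  | zero =>
    intro fuel n v i hv hn _
    simp only [Nat.mul_zero, pow_zero, Nat.lt_one_iff] at hn
    subst hn
    cases fuel <;> simp [pvDeintLoop, pvT]
  | succ k ih =>
    intro fuel n v i hv hn hk
    cases fuel with
    | zero => omega
    | succ f =>
      by_cases hn0 : n = 0
      · subst hn0
        simp [pvDeintLoop, pvT_zero, pvT]
      · have hx0 : ((n : Int) ≠ 0) := by exact_mod_cast hn0
        rw [show pvDeintLoop dim (f + 1) (n : Int) (v : Int) i
            = pvDeintLoop dim f ((n : Int) >>> dim.toNat)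
                (PySem.Int.bor (v : Int) ((PySem.Int.band (n : Int) 1) <<< i)) (i + 1) from by
          simp only [pvDeintLoop]; rw [if_neg hx0]]
        have h1 : PySem.Int.band (n : Int) 1 = ((n % 2 : Nat) : Int) := by
          rw [PySem.Int.band_one]
          exact_mod_cast PySem.Int.mod_natCast n 2
        rw [h1, pvShiftLCast, pvShiftRCast]
        have h2 : PySem.Int.bor (v : Int) (((n % 2) <<< i : Nat) : Int)
            = (((v ||| ((n % 2) <<< i)) : Nat) : Int) := by
          exact_mod_cast PySem.Int.bor_natCast v ((n % 2) <<< i)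
        rw [h2]
        have h3 : v ||| ((n % 2) <<< i) = v + (n % 2) * 2 ^ i := by
          rw [Nat.shiftLeft_eq]
          rcases Nat.mod_two_eq_zero_or_one n with h | h
          · simp [h]
          · simp only [h, one_mul]
            exact pvLorPow i v hv
        rw [h3]
        have hv' : v + (n % 2) * 2 ^ i < 2 ^ (i + 1) := by
          have hb : (n % 2) * 2 ^ i ≤ 2 ^ i := by
            rcases Nat.mod_two_eq_zero_or_one n with h | h <;> simp [h]
          have : (2 : Nat) ^ (i + 1) = 2 ^ i + 2 ^ i := by ring
          omega
        rw [ih f (n >>> dim.toNat) (v + (n % 2) * 2 ^ i) (i + 1) hv' (pvShiftBound hn) (by omega)]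
        congr 1
        show v + n % 2 * 2 ^ i + 2 ^ (i + 1) * pvT dim.toNat k (n >>> dim.toNat)
          = v + 2 ^ i * pvT dim.toNat (k + 1) n
        show _ = v + 2 ^ i * (2 * pvT dim.toNat k (n >>> dim.toNat) + n % 2)
        ring

theorem pvRangeLen (g : Int) (hg : 0 ≤ g) : (PySem.List.pyRange 0 g).length = g.toNat := by
  conv_lhs => rw [← Int.toNat_of_nonneg hg]
  rw [PySem.List.pyRange_zero_natCast]
  simp

-- ===== VERDICT (by name: the statement is the Claim_ definition above) =====
theorem one_dim_to_n_dim_spec : Claim_equal_one_dim_to_n_dim := by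
  intro index gs dim hDom hPre
  obtain ⟨hd0, hgsor, hi0, hiu⟩ := hPre
  unfold Spec_one_dim_to_n_dim one_dim_to_n_dim one_dim_to_n_dim_alt
  have hguard : ¬ (index < 0 ∨ gs ^ dim.toNat ≤ index) := by
    rintro (h | h) <;> linarith
  rw [if_neg hguard, if_neg hguard]
  rw [PySem.List.foldl_append_singleton_eq_map, PySem.List.foldl_append_singleton_eq_map]
  simp only [List.nil_append]
  apply List.map_congr_left
  intro d hd
  rw [PySem.List.mem_pyRange_one] at hd
  obtain ⟨hd1, hd2⟩ := hd
  have hgs1 : (1 : Int) ≤ gs := by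
    rcases hgsor with h | h
    · omega
    · exact h
  obtain ⟨nI, rfl⟩ := Int.eq_ofNat_of_zero_le hi0
  obtain ⟨G, rfl⟩ := Int.eq_ofNat_of_zero_le (by linarith : (0 : Int) ≤ gs)
  rw [Int.shiftRight_natCast_right (nI : Int) d.toNat, pvShiftRCast nI d.toNat]
  rw [pvInner, List.append_nil, pvRangeLen _ (by positivity), Int.toNat_natCast,
      pvParse_revBits, Int.toNat_natCast]
  have hnI : nI < G ^ dim.toNat := by exact_mod_cast hiu
  have hG2 : G ^ dim.toNat ≤ 2 ^ (dim.toNat * G) := by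
    calc G ^ dim.toNat ≤ (2 ^ G) ^ dim.toNat :=
          Nat.pow_le_pow_left (Nat.le_of_lt Nat.lt_two_pow_self) _
      _ = 2 ^ (G * dim.toNat) := by rw [← pow_mul]
      _ = 2 ^ (dim.toNat * G) := by rw [Nat.mul_comm]
  have hnxb : nI >>> d.toNat < 2 ^ (dim.toNat * G) :=
    lt_of_le_of_lt (Nat.shiftRight_le nI d.toNat) (lt_of_lt_of_le hnI hG2)
  have hnxs : nI >>> d.toNat < 2 ^ (dim.toNat * (nI >>> d.toNat + 1)) := by
    have h1 : nI >>> d.toNat < 2 ^ (nI >>> d.toNat + 1) :=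
      lt_trans Nat.lt_two_pow_self (Nat.pow_lt_pow_right one_lt_two (Nat.lt_succ_self _))
    exact lt_of_lt_of_le h1
      (Nat.pow_le_pow_right (by norm_num) (Nat.le_mul_of_pos_left _ (by omega)))
  have hB := pvB dim (nI >>> d.toNat + 1) (nI >>> d.toNat + 1) (nI >>> d.toNat) 0 0
    (by norm_num) hnxs (le_refl _)
  norm_num at hB
  rw [pvShiftRCast nI d.toNat] at hB
  rw [hB]
  have e1 := pvT_ext dim.toNat G (max G (nI >>> d.toNat + 1) - G) (nI >>> d.toNat) hnxb
  have e2 := pvT_ext dim.toNat (nI >>> d.toNat + 1)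
    (max G (nI >>> d.toNat + 1) - (nI >>> d.toNat + 1)) (nI >>> d.toNat) hnxs
  rw [show G + (max G (nI >>> d.toNat + 1) - G) = max G (nI >>> d.toNat + 1) from by omega] at e1
  rw [show nI >>> d.toNat + 1 + (max G (nI >>> d.toNat + 1) - (nI >>> d.toNat + 1))
      = max G (nI >>> d.toNat + 1) from by omega] at e2
  rw [← e1, ← e2]
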